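-- pv_equiv track=rewrite | github.com/mrbenji/cid | cid_classes.py | is_valid_rev
-- ===== SOURCE A (Python) =====
-- VALID_REV_CHARS = "-123456789ABCDEFGHJKLMNPRTUVWY"
--
-- INVALID_REV_CHARS = "IOQSXZ"
--
-- def is_valid_rev(rev_text, mode=1):
--     """
--     :param rev_text: text of the rev being checked for validity
--     :param mode:  mode 2 checks that revs contain only chars in VALID_REV_CHARS, while
--     default mode 1 checks that revs contain only chars NOT in INVALID_REV_CHARS.  The
--     reason for the two modes is that VALID_REV_CHARS is reset if the -i/--invalid-revs
--     argument is present... if it's set we want to allow the Rev object to be created,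
--     but still need to be able to detect that the Rev is invalid per company standards,
--     so we can issue a warning.
--     :return: True or False, depending on whether the selected mode flags the rev as valid
--     """
--
--     # Numeric revisions are legal for redline releases, but must be converted to string.
--     if isinstance(rev_text, int):
--         rev_text = str(rev_text)
--
--     # valid revs must be non-zero-length strings
--     if not (isinstance(rev_text, str) or isinstance(rev_text, str)) or not len(rev_text):
--         return False
--
--     # we start by assuming there are no digits in this rev
--     rev_has_digit = False
--
--     for char in rev_text:
--
--         if char in INVALID_REV_CHARS and mode == 1:
--             return False
--
--         if not char in VALID_REV_CHARS and mode == 2: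
--             return False
--
--         # the dash character is only valid if it's the only character in the rev
--         if char == "-" and len(rev_text) > 1:
--             return False
--
--         if char.isdigit():
--             rev_has_digit = True
--
--         # letters can't follow digits in a revision
--         if char.isalpha() and rev_has_digit:
--             return False
--
--     return True
-- ===== SOURCE B (Python) =====
-- VALID_REV_CHARS = "-123456789ABCDEFGHJKLMNPRTUVWY"
--
-- INVALID_REV_CHARS = "IOQSXZ"
--
-- def is_valid_rev(rev_text, mode=1):
--     # Numeric revisions are legal for redline releases, but must be converted to string.
--     if isinstance(rev_text, int):
--         rev_text = str(rev_text)
--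
--     if not isinstance(rev_text, str) or not rev_text:
--         return False
--
--     # character-set rules, decided once on the set of characters
--     chars = set(rev_text)
--     if mode == 1 and not chars.isdisjoint(INVALID_REV_CHARS):
--         return False
--     if mode == 2 and not chars.issubset(VALID_REV_CHARS):
--         return False
--
--     # a dash is only valid as the sole character
--     if "-" in chars and len(rev_text) > 1:
--         return False
--
--     # letters can't follow digits: locate the first digit, then the suffix
--     # from there must be alpha-free
--     i = 0
--     while i < len(rev_text) and not rev_text[i].isdigit():
--         i += 1
--     return all(not c.isalpha() for c in rev_text[i:])
-- ===== Notes on version B (the rewrite author's own statement) =====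
-- stated objective: alternative
-- what changed: Replaced A's single fused per-character loop (four interleaved rules plus a digit flag with early returns) by a declarative formulation: the character-set and dash rules are decided once on set(rev_text), and the letters-after-digits rule becomes a boundary search for the first digit followed by an alpha-free test of the suffix from there.
import Mathlib
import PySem

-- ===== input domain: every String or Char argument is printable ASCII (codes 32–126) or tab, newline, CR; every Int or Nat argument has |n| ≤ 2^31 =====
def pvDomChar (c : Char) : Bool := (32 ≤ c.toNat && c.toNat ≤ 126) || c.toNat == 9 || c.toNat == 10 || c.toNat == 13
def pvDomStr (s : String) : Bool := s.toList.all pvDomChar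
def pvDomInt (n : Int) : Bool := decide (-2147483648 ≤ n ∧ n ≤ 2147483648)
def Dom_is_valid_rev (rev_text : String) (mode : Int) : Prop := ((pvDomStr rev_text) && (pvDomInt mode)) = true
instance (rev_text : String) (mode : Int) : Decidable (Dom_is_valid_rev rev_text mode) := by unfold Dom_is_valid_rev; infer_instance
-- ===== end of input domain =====

-- B decides the character-set and dash rules once on set(rev_text), then checks the digit/letter rule by locating the first digit and requiring an alpha-free suffix, instead of A's single flagged per-character loop (objective: alternative).


def VALID_REV_CHARS : List Char := "-123456789ABCDEFGHJKLMNPRTUVWY".toList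
def INVALID_REV_CHARS : List Char := "IOQSXZ".toList

-- ===== PORT A =====
-- A's fused for-loop: per character, check invalid-set (mode 1), valid-set (mode 2),
-- dash rule, update the digit flag, then the letters-after-digits rule; early return False.
def loopA (mode : Int) (n : Nat) : List Char → Bool → Bool
  | [], _ => true
  | c :: rest, revHasDigit =>
    if INVALID_REV_CHARS.contains c && mode == 1 then false
    else if !VALID_REV_CHARS.contains c && mode == 2 then false
    else if c == '-' && n > 1 then false
    else
      let revHasDigit' := revHasDigit || c.isDigit
      if c.isAlpha && revHasDigit' then false
      else loopA mode n rest revHasDigit'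

def is_valid_rev (rev_text : String) (mode : Int) : Bool :=
  -- rev_text is a String here, so the isinstance branches are statically resolved
  if rev_text.toList.length == 0 then false
  else loopA mode rev_text.toList.length rev_text.toList false

-- ===== PORT B =====
-- B's `while i < len(rev_text) and not rev_text[i].isdigit(): i += 1` boundary search
def findFirstDigit : List Char → Nat
  | [] => 0
  | c :: rest => if c.isDigit then 0 else findFirstDigit rest + 1

def is_valid_rev_alt (rev_text : String) (mode : Int) : Bool :=
  let cs := rev_text.toList
  if cs.isEmpty then false
  else
    let chars : PySem.Set Char := PySem.Set.ofList cs
    if mode == 1 && !(PySem.Set.isdisjoint chars INVALID_REV_CHARS) then false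
    else if mode == 2 && !(PySem.Set.issubset chars VALID_REV_CHARS) then false
    else if PySem.Set.contains chars '-' && cs.length > 1 then false
    else (cs.drop (findFirstDigit cs)).all (fun c => !c.isAlpha)

-- ===== PRECONDITION & SPEC =====
def Spec_is_valid_rev (rev_text : String) (mode : Int) (out : Bool) : Prop := out = is_valid_rev_alt rev_text mode
instance (rev_text : String) (mode : Int) (out : Bool) : Decidable (Spec_is_valid_rev rev_text mode out) := by unfold Spec_is_valid_rev; infer_instance

-- ===== CLAIM (what is proved, stated in full; the proofs are below) =====
def Claim_equal_is_valid_rev : Prop := ∀ (rev_text : String) (mode : Int), Dom_is_valid_rev rev_text mode → Spec_is_valid_rev rev_text mode (is_valid_rev rev_text mode)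

-- ===== LEMMAS AND PROOFS =====

theorem digit_not_alpha (c : Char) (h : c.isDigit = true) : c.isAlpha = false := by
  simp only [Char.isDigit, Char.isAlpha, Char.isLower, Char.isUpper, decide_eq_true_eq,
    Bool.and_eq_true, Bool.or_eq_false_iff, Bool.and_eq_false_iff, decide_eq_false_iff_not,
    ge_iff_le, UInt32.le_iff_toNat_le] at *
  have e0 : ('0').val.toNat = 48 := rfl
  have e9 : ('9').val.toNat = 57 := rfl
  have ea : ('a').val.toNat = 97 := rfl
  have ez : ('z').val.toNat = 122 := rfl
  have eA : ('A').val.toNat = 65 := rfl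
  have eZ : ('Z').val.toNat = 90 := rfl
  omega

-- proof-side intermediate: A's digit/letter bookkeeping in isolation
def scanB : List Char → Bool → Bool
  | [], _ => true
  | c :: rest, seen =>
    if c.isDigit then scanB rest true
    else if c.isAlpha && seen then false
    else scanB rest seen

theorem scanB_true (cs : List Char) :
    scanB cs true = cs.all (fun c => !c.isAlpha) := by
  induction cs with
  | nil => simp [scanB]
  | cons c rest ih =>
    simp only [scanB, List.all_cons]
    cases hd : c.isDigit
    · cases ha : c.isAlpha <;> simp [ih]
    · rw [digit_not_alpha c hd]; simp [ih]

theorem scanB_false (cs : List Char) :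
    scanB cs false = (cs.drop (findFirstDigit cs)).all (fun c => !c.isAlpha) := by
  induction cs with
  | nil => simp [scanB, findFirstDigit]
  | cons c rest ih =>
    simp only [scanB, findFirstDigit]
    cases hd : c.isDigit
    · simp [ih]
    · rw [if_pos rfl, if_pos rfl, scanB_true, List.drop_zero, List.all_cons,
        digit_not_alpha c hd]
      simp

theorem beq_comm_char (a b : Char) : (a == b) = (b == a) := by
  simp [eq_comm]

set_option maxHeartbeats 1000000 in
theorem loopA_eq (mode : Int) (n : Nat) (cs : List Char) (b : Bool) :
    loopA mode n cs b =
      (!(mode == 1 && cs.any (fun c => INVALID_REV_CHARS.contains c)) &&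
       !(mode == 2 && cs.any (fun c => !VALID_REV_CHARS.contains c)) &&
       !(cs.contains '-' && n > 1) &&
       scanB cs b) := by
  induction cs generalizing b with
  | nil => simp [loopA, scanB]
  | cons c rest ih =>
    simp only [loopA, scanB, List.any_cons, List.contains_cons]
    cases h1 : INVALID_REV_CHARS.contains c <;>
    cases h2 : VALID_REV_CHARS.contains c <;>
    cases h3 : (mode == 1 : Bool) <;>
    cases h4 : (mode == 2 : Bool) <;>
    cases h5 : (c == '-' : Bool) <;>
    cases h6 : decide (n > 1) <;>
    cases h7 : c.isDigit <;>
    cases h8 : c.isAlpha <;>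
    cases b <;>
    first
      | (rw [digit_not_alpha c h7] at h8; exact absurd h8 (by decide))
      | (simp_all [beq_comm_char] <;> (try (rw [(by simp [h5] : ((c == '-' : Bool)) = false)]; simp)))

-- the set-based checks of B, rephrased over the raw character list
theorem isdisjoint_ofList (cs t : List Char) :
    PySem.Set.isdisjoint (PySem.Set.ofList cs) t = !cs.any (fun c => t.contains c) := by
  apply Bool.eq_iff_iff.mpr
  simp [PySem.Set.isdisjoint_iff, PySem.Set.mem_ofList]

theorem issubset_ofList (cs t : List Char) :
    PySem.Set.issubset (PySem.Set.ofList cs) t = !cs.any (fun c => !t.contains c) := by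
  apply Bool.eq_iff_iff.mpr
  simp [PySem.Set.issubset_iff, PySem.Set.mem_ofList]

theorem contains_ofList (cs : List Char) (x : Char) :
    PySem.Set.contains (PySem.Set.ofList cs) x = cs.contains x := by
  apply Bool.eq_iff_iff.mpr
  simp [PySem.Set.contains, PySem.Set.mem_ofList]

-- a chain of early-return ifs is the conjunction of the negated guards
theorem ite_false_chain (a b c d : Bool) :
    (if a then false else if b then false else if c then false else d) =
      (!a && !b && !c && d) := by
  cases a <;> cases b <;> cases c <;> simp

-- ===== VERDICT (by name: the statement is the Claim_ definition above) =====
theorem is_valid_rev_spec : Claim_equal_is_valid_rev := by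
  intro rev_text mode _
  unfold Spec_is_valid_rev is_valid_rev is_valid_rev_alt
  cases hcs : rev_text.toList with
  | nil => simp
  | cons c rest =>
    rw [if_neg (by simp), if_neg (by simp), loopA_eq, scanB_false]
    simp only [isdisjoint_ofList, issubset_ofList, contains_ofList, ite_false_chain]
    simp [Bool.and_comm]
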